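-- pv_equiv track=rewrite | github.com/amitcjmu/Stock-Analysis | backend/seeding/02_discovery_flows.py | get_task_durations
-- ===== SOURCE A (Python) =====
-- def get_task_durations(progress: int) -> dict:
--     """Generate task durations based on progress."""
--     durations = {}
--
--     base_tasks = [
--         ("initialize_flow", 2),
--         ("setup_environment", 3),
--         ("import_data", 15),
--         ("validate_data", 10),
--         ("map_fields", 20),
--         ("discover_assets", 25),
--         ("analyze_dependencies", 30)
--     ]
--
--     for task, base_duration in base_tasks:
--         if progress > len(durations) * (100 / len(base_tasks)):
--             durations[task] = base_duration + (progress // 20)  # Add some variation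
--
--     return durations
-- ===== SOURCE B (Python) =====
-- def get_task_durations(progress: int) -> dict:
--     """Generate task durations based on progress.
--
--     Closed form: task k (0-based) is included iff progress > k*100/7, and the
--     kept tasks are exactly a leading prefix, so the prefix length is computed
--     directly instead of running the stateful loop.
--     """
--     base_tasks = [
--         ("initialize_flow", 2),
--         ("setup_environment", 3),
--         ("import_data", 15),
--         ("validate_data", 10),
--         ("map_fields", 20),
--         ("discover_assets", 25),
--         ("analyze_dependencies", 30)
--     ]
--     n = 0 if progress <= 0 else min(7, (7 * progress - 1) // 100 + 1)
--     bonus = progress // 20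
--     return {task: base + bonus for task, base in base_tasks[:n]}
-- ===== Notes on version B (the rewrite author's own statement) =====
-- stated objective: simpler
-- what changed: Replaced the stateful loop (which grows a dict and re-tests a threshold that freezes once a task is skipped) by a closed-form prefix-length computation via exact integer division plus a single comprehension over that prefix of base_tasks.
import Mathlib
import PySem

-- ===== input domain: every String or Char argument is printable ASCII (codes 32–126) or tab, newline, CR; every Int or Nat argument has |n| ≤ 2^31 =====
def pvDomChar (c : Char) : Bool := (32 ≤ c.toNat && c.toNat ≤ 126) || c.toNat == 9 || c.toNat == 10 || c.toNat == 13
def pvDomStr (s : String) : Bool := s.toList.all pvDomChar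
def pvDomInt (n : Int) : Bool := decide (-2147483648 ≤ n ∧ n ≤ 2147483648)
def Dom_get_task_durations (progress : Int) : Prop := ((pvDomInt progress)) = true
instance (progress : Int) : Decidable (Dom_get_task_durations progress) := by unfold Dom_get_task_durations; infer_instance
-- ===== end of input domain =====

-- B replaces A's stateful threshold loop by a closed-form prefix length plus one map (objective: simpler).

-- ===== PORT A =====
-- Hand-ported float arithmetic: Python computes `len(durations) * (100 / 7)` in IEEE-754
-- doubles.  For k = 0..6 (the only lengths reachable) pvFloatThresh k is the EXACT rational
-- value (num, den) of the double k * (100/7); since |progress| ≤ 2^53 is exactly representable,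
-- the Python comparison `progress > k * (100/7)` is exactly `progress * den > num`.
def pvFloatThresh : Nat → Int × Int
  | 0 => (0, 1)
  | 1 => (8042142191733029, 562949953421312)
  | 2 => (8042142191733029, 281474976710656)
  | 3 => (1507901660949943, 35184372088832)
  | 4 => (8042142191733029, 140737488355328)
  | 5 => (5026338869833143, 70368744177664)
  | 6 => (1507901660949943, 17592186044416)
  | _ => (0, 1)

def get_task_durations (progress : Int) : List (String × Int) :=
  let base_tasks : List (String × Int) :=
    [("initialize_flow", 2), ("setup_environment", 3), ("import_data", 15),
     ("validate_data", 10), ("map_fields", 20), ("discover_assets", 25),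
     ("analyze_dependencies", 30)]
  (base_tasks.foldl
    (fun (durations : PySem.Dict String Int) tb =>
      let t := pvFloatThresh durations.size
      if progress * t.2 > t.1 then
        durations.insert tb.1 (tb.2 + PySem.Int.floordiv progress 20)
      else durations)
    PySem.Dict.empty).items

-- ===== PORT B =====
def get_task_durations_alt (progress : Int) : List (String × Int) :=
  let base_tasks : List (String × Int) :=
    [("initialize_flow", 2), ("setup_environment", 3), ("import_data", 15),
     ("validate_data", 10), ("map_fields", 20), ("discover_assets", 25),
     ("analyze_dependencies", 30)]
  let n : Int := if progress ≤ 0 then 0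
                 else min 7 (PySem.Int.floordiv (7 * progress - 1) 100 + 1)
  let bonus := PySem.Int.floordiv progress 20
  (PySem.List.slice base_tasks none (some n)).map (fun tb => (tb.1, tb.2 + bonus))

-- ===== PRECONDITION & SPEC =====
def Spec_get_task_durations (progress : Int) (out : List (String × Int)) : Prop := out = get_task_durations_alt progress
instance (progress : Int) (out : List (String × Int)) : Decidable (Spec_get_task_durations progress out) := by unfold Spec_get_task_durations; infer_instance

-- ===== CLAIM (what is proved, stated in full; the proofs are below) =====
def Claim_equal_get_task_durations : Prop := ∀ (progress : Int), Dom_get_task_durations progress → Spec_get_task_durations progress (get_task_durations progress)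

-- ===== LEMMAS AND PROOFS =====

-- One step of A's fold when the threshold test succeeds (resp. fails); k is the current dict size.
theorem pv_stepT (p : Int) (k : Nat) (d : PySem.Dict String Int) (x : String × Int) (xs : List (String × Int))
    (hs : d.size = k) (h : (pvFloatThresh k).1 < p * (pvFloatThresh k).2) :
    List.foldl (fun (durations : PySem.Dict String Int) tb =>
      let t := pvFloatThresh durations.size
      if p * t.2 > t.1 then durations.insert tb.1 (tb.2 + PySem.Int.floordiv p 20) else durations) d (x :: xs)
    = List.foldl (fun (durations : PySem.Dict String Int) tb =>
      let t := pvFloatThresh durations.size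
      if p * t.2 > t.1 then durations.insert tb.1 (tb.2 + PySem.Int.floordiv p 20) else durations)
      (d.insert x.1 (x.2 + PySem.Int.floordiv p 20)) xs := by
  rw [List.foldl_cons]
  congr 1
  simp only [gt_iff_lt, hs, if_pos h]

theorem pv_stepF (p : Int) (k : Nat) (d : PySem.Dict String Int) (x : String × Int) (xs : List (String × Int))
    (hs : d.size = k) (h : ¬ (pvFloatThresh k).1 < p * (pvFloatThresh k).2) :
    List.foldl (fun (durations : PySem.Dict String Int) tb =>
      let t := pvFloatThresh durations.size
      if p * t.2 > t.1 then durations.insert tb.1 (tb.2 + PySem.Int.floordiv p 20) else durations) d (x :: xs)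
    = List.foldl (fun (durations : PySem.Dict String Int) tb =>
      let t := pvFloatThresh durations.size
      if p * t.2 > t.1 then durations.insert tb.1 (tb.2 + PySem.Int.floordiv p 20) else durations) d xs := by
  rw [List.foldl_cons]
  congr 1
  simp only [gt_iff_lt, hs, if_neg h]

-- ===== VERDICT (by name: the statement is the Claim_ definition above) =====
set_option maxHeartbeats 1000000 in
theorem get_task_durations_spec : Claim_equal_get_task_durations := by
  intro p _hD
  unfold Spec_get_task_durations
  simp only [get_task_durations]
  by_cases c0 : p ≤ 0
  · rw [pv_stepF p 0 _ _ _ rfl (by norm_num [pvFloatThresh]; omega),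
        pv_stepF p 0 _ _ _ rfl (by norm_num [pvFloatThresh]; omega),
        pv_stepF p 0 _ _ _ rfl (by norm_num [pvFloatThresh]; omega),
        pv_stepF p 0 _ _ _ rfl (by norm_num [pvFloatThresh]; omega),
        pv_stepF p 0 _ _ _ rfl (by norm_num [pvFloatThresh]; omega),
        pv_stepF p 0 _ _ _ rfl (by norm_num [pvFloatThresh]; omega),
        pv_stepF p 0 _ _ _ rfl (by norm_num [pvFloatThresh]; omega),
        List.foldl_nil]
    simp only [get_task_durations_alt]
    rw [if_pos c0]
    rfl
  · have hp : ¬ (p ≤ 0) := c0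
    by_cases c1 : p ≤ 14
    · have hn : PySem.Int.floordiv (7 * p - 1) 100 = 0 := by
        rw [PySem.Int.floordiv_eq_ediv_of_pos (by norm_num)]; omega
      rw [pv_stepT p 0 _ _ _ rfl (by norm_num [pvFloatThresh]; omega),
          pv_stepF p 1 _ _ _ rfl (by norm_num [pvFloatThresh]; omega),
          pv_stepF p 1 _ _ _ rfl (by norm_num [pvFloatThresh]; omega),
          pv_stepF p 1 _ _ _ rfl (by norm_num [pvFloatThresh]; omega),
          pv_stepF p 1 _ _ _ rfl (by norm_num [pvFloatThresh]; omega),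
          pv_stepF p 1 _ _ _ rfl (by norm_num [pvFloatThresh]; omega),
          pv_stepF p 1 _ _ _ rfl (by norm_num [pvFloatThresh]; omega),
          List.foldl_nil]
      simp only [get_task_durations_alt, hn]
      rw [if_neg hp]
      rfl
    by_cases c2 : p ≤ 28
    · have hn : PySem.Int.floordiv (7 * p - 1) 100 = 1 := by
        rw [PySem.Int.floordiv_eq_ediv_of_pos (by norm_num)]; omega
      rw [pv_stepT p 0 _ _ _ rfl (by norm_num [pvFloatThresh]; omega),
          pv_stepT p 1 _ _ _ rfl (by norm_num [pvFloatThresh]; omega),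
          pv_stepF p 2 _ _ _ rfl (by norm_num [pvFloatThresh]; omega),
          pv_stepF p 2 _ _ _ rfl (by norm_num [pvFloatThresh]; omega),
          pv_stepF p 2 _ _ _ rfl (by norm_num [pvFloatThresh]; omega),
          pv_stepF p 2 _ _ _ rfl (by norm_num [pvFloatThresh]; omega),
          pv_stepF p 2 _ _ _ rfl (by norm_num [pvFloatThresh]; omega),
          List.foldl_nil]
      simp only [get_task_durations_alt, hn]
      rw [if_neg hp]
      rfl
    by_cases c3 : p ≤ 42
    · have hn : PySem.Int.floordiv (7 * p - 1) 100 = 2 := by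
        rw [PySem.Int.floordiv_eq_ediv_of_pos (by norm_num)]; omega
      rw [pv_stepT p 0 _ _ _ rfl (by norm_num [pvFloatThresh]; omega),
          pv_stepT p 1 _ _ _ rfl (by norm_num [pvFloatThresh]; omega),
          pv_stepT p 2 _ _ _ rfl (by norm_num [pvFloatThresh]; omega),
          pv_stepF p 3 _ _ _ rfl (by norm_num [pvFloatThresh]; omega),
          pv_stepF p 3 _ _ _ rfl (by norm_num [pvFloatThresh]; omega),
          pv_stepF p 3 _ _ _ rfl (by norm_num [pvFloatThresh]; omega),
          pv_stepF p 3 _ _ _ rfl (by norm_num [pvFloatThresh]; omega),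
          List.foldl_nil]
      simp only [get_task_durations_alt, hn]
      rw [if_neg hp]
      rfl
    by_cases c4 : p ≤ 57
    · have hn : PySem.Int.floordiv (7 * p - 1) 100 = 3 := by
        rw [PySem.Int.floordiv_eq_ediv_of_pos (by norm_num)]; omega
      rw [pv_stepT p 0 _ _ _ rfl (by norm_num [pvFloatThresh]; omega),
          pv_stepT p 1 _ _ _ rfl (by norm_num [pvFloatThresh]; omega),
          pv_stepT p 2 _ _ _ rfl (by norm_num [pvFloatThresh]; omega),
          pv_stepT p 3 _ _ _ rfl (by norm_num [pvFloatThresh]; omega),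
          pv_stepF p 4 _ _ _ rfl (by norm_num [pvFloatThresh]; omega),
          pv_stepF p 4 _ _ _ rfl (by norm_num [pvFloatThresh]; omega),
          pv_stepF p 4 _ _ _ rfl (by norm_num [pvFloatThresh]; omega),
          List.foldl_nil]
      simp only [get_task_durations_alt, hn]
      rw [if_neg hp]
      rfl
    by_cases c5 : p ≤ 71
    · have hn : PySem.Int.floordiv (7 * p - 1) 100 = 4 := by
        rw [PySem.Int.floordiv_eq_ediv_of_pos (by norm_num)]; omega
      rw [pv_stepT p 0 _ _ _ rfl (by norm_num [pvFloatThresh]; omega),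
          pv_stepT p 1 _ _ _ rfl (by norm_num [pvFloatThresh]; omega),
          pv_stepT p 2 _ _ _ rfl (by norm_num [pvFloatThresh]; omega),
          pv_stepT p 3 _ _ _ rfl (by norm_num [pvFloatThresh]; omega),
          pv_stepT p 4 _ _ _ rfl (by norm_num [pvFloatThresh]; omega),
          pv_stepF p 5 _ _ _ rfl (by norm_num [pvFloatThresh]; omega),
          pv_stepF p 5 _ _ _ rfl (by norm_num [pvFloatThresh]; omega),
          List.foldl_nil]
      simp only [get_task_durations_alt, hn]
      rw [if_neg hp]
      rfl
    by_cases c6 : p ≤ 85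
    · have hn : PySem.Int.floordiv (7 * p - 1) 100 = 5 := by
        rw [PySem.Int.floordiv_eq_ediv_of_pos (by norm_num)]; omega
      rw [pv_stepT p 0 _ _ _ rfl (by norm_num [pvFloatThresh]; omega),
          pv_stepT p 1 _ _ _ rfl (by norm_num [pvFloatThresh]; omega),
          pv_stepT p 2 _ _ _ rfl (by norm_num [pvFloatThresh]; omega),
          pv_stepT p 3 _ _ _ rfl (by norm_num [pvFloatThresh]; omega),
          pv_stepT p 4 _ _ _ rfl (by norm_num [pvFloatThresh]; omega),
          pv_stepT p 5 _ _ _ rfl (by norm_num [pvFloatThresh]; omega),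
          pv_stepF p 6 _ _ _ rfl (by norm_num [pvFloatThresh]; omega),
          List.foldl_nil]
      simp only [get_task_durations_alt, hn]
      rw [if_neg hp]
      rfl
    · have hmin : min 7 (PySem.Int.floordiv (7 * p - 1) 100 + 1) = 7 := by
        rw [PySem.Int.floordiv_eq_ediv_of_pos (by norm_num)]
        have h6 : 6 ≤ (7 * p - 1) / 100 := by omega
        omega
      rw [pv_stepT p 0 _ _ _ rfl (by norm_num [pvFloatThresh]; omega),
          pv_stepT p 1 _ _ _ rfl (by norm_num [pvFloatThresh]; omega),
          pv_stepT p 2 _ _ _ rfl (by norm_num [pvFloatThresh]; omega),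
          pv_stepT p 3 _ _ _ rfl (by norm_num [pvFloatThresh]; omega),
          pv_stepT p 4 _ _ _ rfl (by norm_num [pvFloatThresh]; omega),
          pv_stepT p 5 _ _ _ rfl (by norm_num [pvFloatThresh]; omega),
          pv_stepT p 6 _ _ _ rfl (by norm_num [pvFloatThresh]; omega),
          List.foldl_nil]
      simp only [get_task_durations_alt, hmin]
      rw [if_neg hp]
      rfl
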